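-- pv_equiv track=rewrite | github.com/superchangme/snake-ai-algorithm | backend/phase8_spiral_ai.py | build_snake_path
-- ===== SOURCE A (Python) =====
-- def build_snake_path(width, height):
--     """构造蛇形路径"""
--     path = []
--
--     for x in range(width):
--         if x % 2 == 0:
--             for y in range(height):
--                 path.append((x, y))
--         else:
--             for y in range(height - 1, -1, -1):
--                 path.append((x, y))
--
--     order = [[0] * width for _ in range(height)]
--     for i, (px, py) in enumerate(path):
--         order[py][px] = i
--
--     return order, path
-- ===== SOURCE B (Python) =====
-- def build_snake_path(width, height):
--     """构造蛇形路径"""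
--     path = []
--     for x in range(width):
--         col = [(x, y) for y in range(height)]
--         path += col if x % 2 == 0 else col[::-1]
--
--     order = [[x * height + (y if x % 2 == 0 else height - 1 - y)
--               for x in range(width)]
--              for y in range(height)]
--
--     return order, path
-- ===== Notes on version B (the rewrite author's own statement) =====
-- stated objective: alternative
-- what changed: The position-order grid is computed directly from the closed-form index x*height + (y if x even else height-1-y) instead of being built by scattering enumerate(path) into a mutable zero grid, so order no longer depends on the recorded path.
import Mathlib
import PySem

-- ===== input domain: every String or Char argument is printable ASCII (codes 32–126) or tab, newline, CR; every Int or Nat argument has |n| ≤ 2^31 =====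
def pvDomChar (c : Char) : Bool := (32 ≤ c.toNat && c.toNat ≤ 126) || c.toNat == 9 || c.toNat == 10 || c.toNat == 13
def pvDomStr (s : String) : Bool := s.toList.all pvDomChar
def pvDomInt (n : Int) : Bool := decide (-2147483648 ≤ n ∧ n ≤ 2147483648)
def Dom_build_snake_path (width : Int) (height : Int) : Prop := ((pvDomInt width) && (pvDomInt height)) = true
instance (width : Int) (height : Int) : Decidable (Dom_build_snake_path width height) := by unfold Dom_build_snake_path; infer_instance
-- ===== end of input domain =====

-- B derives the position-order grid by the closed-form index x*height + (y or height-1-y by column parity)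
-- instead of scattering enumerate(path) into a zero grid; objective: alternative decomposition (order no longer depends on path).

-- ===== PORT A =====
def build_snake_path (width : Int) (height : Int) : List (List Int) × (List (Int × Int)) :=
  let path : List (Int × Int) :=
    (PySem.List.pyRange 0 width 1).foldl (fun path x =>
      if PySem.Int.mod x 2 == 0 then
        (PySem.List.pyRange 0 height 1).foldl (fun p y => p ++ [(x, y)]) path
      else
        (PySem.List.pyRange (height - 1) (-1) (-1)).foldl (fun p y => p ++ [(x, y)]) path) []
  -- [[0] * width for _ in range(height)]  ([0] * n is [] for n ≤ 0, exactly List.replicate width.toNat)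
  let order0 : List (List Int) :=
    (PySem.List.pyRange 0 height 1).map (fun _ => List.replicate width.toNat (0 : Int))
  -- for i, (px, py) in enumerate(path): order[py][px] = i
  -- (pyGetD/pySetD are exact here: every index enumerate(path) yields is nonnegative and in range)
  let order : List (List Int) :=
    (PySem.List.enumerate path 0).foldl (fun ord p =>
      PySem.List.pySetD ord p.2.2 (PySem.List.pySetD (PySem.List.pyGetD ord p.2.2 []) p.2.1 p.1)) order0
  (order, path)

-- ===== PORT B =====
def build_snake_path_alt (width : Int) (height : Int) : List (List Int) × (List (Int × Int)) :=
  let path : List (Int × Int) :=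
    (PySem.List.pyRange 0 width 1).foldl (fun path x =>
      let col := (PySem.List.pyRange 0 height 1).map (fun y => (x, y))
      path ++ (if PySem.Int.mod x 2 == 0 then col else col.reverse)) []
  let order : List (List Int) :=
    (PySem.List.pyRange 0 height 1).map (fun y =>
      (PySem.List.pyRange 0 width 1).map (fun x =>
        x * height + (if PySem.Int.mod x 2 == 0 then y else height - 1 - y)))
  (order, path)

-- ===== PRECONDITION & SPEC =====
def Spec_build_snake_path (width : Int) (height : Int) (out : List (List Int) × (List (Int × Int))) : Prop := out = build_snake_path_alt width height
instance (width : Int) (height : Int) (out : List (List Int) × (List (Int × Int))) : Decidable (Spec_build_snake_path width height out) := by unfold Spec_build_snake_path; infer_instance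

-- ===== CLAIM (what is proved, stated in full; the proofs are below) =====
def Claim_equal_build_snake_path : Prop := ∀ (width : Int) (height : Int), Dom_build_snake_path width height → Spec_build_snake_path width height (build_snake_path width height)

-- ===== LEMMAS AND PROOFS =====

-- the column of cells for x, top-down, and the segment the snake appends for x
def snakeCol (h x : Int) : List (Int × Int) := List.map (fun j : Nat => (x, (j : Int))) (List.range h.toNat)
def snakeSeg (h x : Int) : List (Int × Int) :=
  if PySem.Int.mod x 2 == 0 then snakeCol h x else (snakeCol h x).reverse
-- the serpentine path as a flatMap of segments
def pathFM (w h : Int) : List (Int × Int) := List.flatMap (fun j : Nat => snakeSeg h (j : Int)) (List.range w.toNat)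
-- the order index of cell (x, y)
def snakeFml (h : Int) (x y : Nat) : Int :=
  (x : Int) * h + (if PySem.Int.mod (x : Int) 2 == 0 then (y : Int) else h - 1 - (y : Int))
-- the grid after the first k columns have been scattered
def gridP (w h : Int) (k : Nat) : List (List Int) :=
  (List.range h.toNat).map (fun y => (List.range w.toNat).map (fun x => if x < k then snakeFml h x y else 0))

lemma reverse_range_eq_map (m : Nat) :
    (List.range m).reverse = (List.range m).map (fun j => m - 1 - j) := by
  apply List.ext_getElem
  · simp
  · intro i h1 h2
    simp only [List.length_reverse, List.length_range] at h1
    simp [List.getElem_reverse, List.getElem_map, List.getElem_range]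

lemma set_map_range {α : Type} (m j : Nat) (f : Nat → α) (v : α) :
    ((List.range m).map f).set j v = (List.range m).map (fun i => if i = j then v else f i) := by
  apply List.ext_getElem
  · simp
  · intro i h1 h2
    simp only [List.length_set, List.length_map, List.length_range] at h1
    rw [List.getElem_set]
    simp only [List.getElem_map, List.getElem_range]
    by_cases h : i = j
    · simp [h]
    · rw [if_neg h, if_neg (show ¬ j = i from fun hji => h hji.symm)]

lemma enumerate_map_range {α : Type} (m : Nat) (g : Nat → α) (s : Int) :
    PySem.List.enumerate ((List.range m).map g) s
      = (List.range m).map (fun j : Nat => (s + (j : Int), g j)) := by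
  induction m with
  | zero => rfl
  | succ n ih =>
      rw [List.range_succ, List.map_append, List.map_append, PySem.List.enumerate_append, ih]
      simp

lemma length_snakeSeg (h x : Int) : (snakeSeg h x).length = h.toNat := by
  unfold snakeSeg snakeCol
  split <;> simp

lemma length_prefix (h : Int) (k : Nat) :
    (List.flatMap (fun j : Nat => snakeSeg h (j : Int)) (List.range k)).length = k * h.toNat := by
  induction k with
  | zero => simp
  | succ n ih =>
      rw [List.range_succ, List.flatMap_append, List.length_append, ih]
      simp [length_snakeSeg, Nat.succ_mul]

lemma scatter_rows (H : Nat) (row : Nat → List Int) (c : Int) (v : Nat → Int) (L : List Nat)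
    (hL : ∀ y ∈ L, y < H) (hnd : L.Nodup) :
    L.foldl (fun (g : List (List Int)) (y : Nat) =>
        PySem.List.pySetD g (y : Int) (PySem.List.pySetD (PySem.List.pyGetD g (y : Int) []) c (v y)))
      ((List.range H).map row)
    = (List.range H).map (fun y : Nat => if y ∈ L then PySem.List.pySetD (row y) c (v y) else row y) := by
  induction L generalizing row with
  | nil => simp
  | cons y0 L' ih =>
      have hy0 : y0 < H := hL y0 (List.mem_cons_self ..)
      have hy0L' : y0 ∉ L' := (List.nodup_cons.mp hnd).1
      rw [List.foldl_cons, PySem.List.pyGetD_natCast, PySem.List.pySetD_natCast,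
        PySem.List.getD_map_range row H y0 _ hy0, set_map_range,
        ih (fun i => if i = y0 then PySem.List.pySetD (row y0) c (v y0) else row i)
          (fun y hy => hL y (List.mem_cons_of_mem _ hy)) (List.nodup_cons.mp hnd).2]
      apply List.map_congr_left
      intro y hy
      by_cases hyL : y ∈ L'
      · have hne : y ≠ y0 := fun hEq => hy0L' (hEq ▸ hyL)
        simp [hyL, hne]
      · by_cases hyy0 : y = y0
        · simp [hyy0, hy0L']
        · simp [hyL, hyy0]

lemma map_write_eq (w h : Int) (k : Nat) (L : List Nat)
    (hLmem : ∀ y, y < h.toNat → y ∈ L) (v : Nat → Int)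
    (hv : ∀ y, y < h.toNat → v y = snakeFml h k y) :
    (List.range h.toNat).map (fun y : Nat =>
      if y ∈ L then
        PySem.List.pySetD ((List.range w.toNat).map (fun x => if x < k then snakeFml h x y else 0))
          (k : Int) (v y)
      else (List.range w.toNat).map (fun x => if x < k then snakeFml h x y else 0))
    = gridP w h (k + 1) := by
  unfold gridP
  apply List.map_congr_left
  intro y hy
  have hyH := List.mem_range.mp hy
  rw [if_pos (hLmem y hyH), PySem.List.pySetD_natCast, set_map_range]
  apply List.map_congr_left
  intro x hx
  by_cases hxk : x = k
  · rw [if_pos hxk, if_pos (by omega), hxk, hv y hyH]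
  · rw [if_neg hxk]
    by_cases hlt : x < k
    · rw [if_pos hlt, if_pos (by omega)]
    · rw [if_neg hlt, if_neg (by omega)]

lemma scatter_seg (w h : Int) (k : Nat) :
    (PySem.List.enumerate (snakeSeg h (k : Int)) ((k * h.toNat : Nat) : Int)).foldl
        (fun ord p =>
          PySem.List.pySetD ord p.2.2 (PySem.List.pySetD (PySem.List.pyGetD ord p.2.2 []) p.2.1 p.1))
        (gridP w h k)
    = gridP w h (k + 1) := by
  by_cases hpar : PySem.Int.mod (k : Int) 2 == 0
  · rw [snakeSeg, if_pos hpar, snakeCol, enumerate_map_range, List.foldl_map]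
    refine (scatter_rows h.toNat
        (fun y => (List.range w.toNat).map (fun x => if x < k then snakeFml h x y else 0))
        (k : Int) (fun j => ((k * h.toNat : Nat) : Int) + (j : Int)) (List.range h.toNat)
        (fun y hy => List.mem_range.mp hy) List.nodup_range).trans ?_
    refine map_write_eq w h k _ (fun y hy => List.mem_range.mpr hy) _ ?_
    intro y hy
    unfold snakeFml
    rw [if_pos hpar]
    have hh : ((h.toNat : Int)) = h := by omega
    push_cast [hh]
    ring
  · rw [snakeSeg, if_neg hpar, snakeCol, ← List.map_reverse, reverse_range_eq_map,
      List.map_map, enumerate_map_range, List.foldl_map]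
    rw [PySem.List.foldl_congr_mem (List.range h.toNat) _
      (fun (g : List (List Int)) (j : Nat) =>
        PySem.List.pySetD g ((h.toNat - 1 - j : Nat) : Int)
          (PySem.List.pySetD (PySem.List.pyGetD g ((h.toNat - 1 - j : Nat) : Int) []) (k : Int)
            (((k * h.toNat : Nat) : Int) + ((h.toNat - 1 - (h.toNat - 1 - j) : Nat) : Int))))
      _ (by
        intro acc j hj
        have hj' := List.mem_range.mp hj
        have h2 : h.toNat - 1 - (h.toNat - 1 - j) = j := by omega
        simp only [Function.comp_apply, h2])]
    refine (Eq.trans (List.foldl_map (f := fun j : Nat => h.toNat - 1 - j)).symm (scatter_rows h.toNat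
        (fun y => (List.range w.toNat).map (fun x => if x < k then snakeFml h x y else 0))
        (k : Int) (fun y => ((k * h.toNat : Nat) : Int) + ((h.toNat - 1 - y : Nat) : Int))
        ((List.range h.toNat).map (fun j => h.toNat - 1 - j))
        (fun y hy => by
          rcases List.mem_map.mp hy with ⟨j, hj, rfl⟩
          have := List.mem_range.mp hj
          omega)
        (by rw [← reverse_range_eq_map]; exact List.nodup_reverse.mpr List.nodup_range))).trans ?_
    refine map_write_eq w h k _ (fun y hy => ?_) _ ?_
    · exact List.mem_map.mpr ⟨h.toNat - 1 - y, List.mem_range.mpr (by omega), by omega⟩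
    · intro y hy
      unfold snakeFml
      rw [if_neg hpar]
      have hh : ((h.toNat : Int)) = h := by omega
      have h1 : ((k * h.toNat : Nat) : Int) = (k : Int) * h := by push_cast [hh]; ring
      have h2 : ((h.toNat - 1 - y : Nat) : Int) = h - 1 - (y : Int) := by omega
      rw [h1, h2]

lemma scatter_prefix (w h : Int) (k : Nat) :
    (PySem.List.enumerate (List.flatMap (fun j : Nat => snakeSeg h (j : Int)) (List.range k)) 0).foldl
        (fun ord p =>
          PySem.List.pySetD ord p.2.2 (PySem.List.pySetD (PySem.List.pyGetD ord p.2.2 []) p.2.1 p.1))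
        (gridP w h 0)
    = gridP w h k := by
  induction k with
  | zero => rfl
  | succ n ih =>
      rw [List.range_succ, List.flatMap_append, PySem.List.enumerate_append, List.foldl_append,
        ih]
      simp only [List.flatMap_cons, List.flatMap_nil, List.append_nil, length_prefix, zero_add]
      exact scatter_seg w h n

lemma pathA_eq (w h : Int) :
    (PySem.List.pyRange 0 w 1).foldl (fun path x =>
      if PySem.Int.mod x 2 == 0 then
        (PySem.List.pyRange 0 h 1).foldl (fun p y => p ++ [(x, y)]) path
      else
        (PySem.List.pyRange (h - 1) (-1) (-1)).foldl (fun p y => p ++ [(x, y)]) path) []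
    = pathFM w h := by
  have hbody : ∀ (p : List (Int × Int)) (x : Int),
      (if PySem.Int.mod x 2 == 0 then
        (PySem.List.pyRange 0 h 1).foldl (fun p y => p ++ [(x, y)]) p
      else
        (PySem.List.pyRange (h - 1) (-1) (-1)).foldl (fun p y => p ++ [(x, y)]) p)
      = p ++ snakeSeg h x := by
    intro p x
    by_cases hx : PySem.Int.mod x 2 == 0
    · rw [if_pos hx, PySem.List.foldl_append_singleton_eq_map]
      unfold snakeSeg snakeCol
      rw [if_pos hx, PySem.List.pyRange_zero, List.map_map]
      rfl
    · rw [if_neg hx,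
        show PySem.List.pyRange (h - 1) (-1) (-1) = (PySem.List.pyRange 0 h 1).reverse from by
          rw [PySem.List.pyRange_neg_one_eq_reverse]; norm_num,
        PySem.List.foldl_append_singleton_eq_map, List.map_reverse]
      unfold snakeSeg snakeCol
      rw [if_neg hx, PySem.List.pyRange_zero, List.map_map]
      rfl
  rw [PySem.List.pyRange_zero w, List.foldl_map,
    PySem.List.foldl_congr_mem (List.range w.toNat) _
      (fun (p : List (Int × Int)) (j : Nat) => p ++ snakeSeg h (j : Int)) []
      (fun p j _ => hbody p (j : Int)),
    PySem.List.foldl_append_eq_flatMap]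
  rfl

lemma pathB_eq (w h : Int) :
    (PySem.List.pyRange 0 w 1).foldl (fun path x =>
      let col := (PySem.List.pyRange 0 h 1).map (fun y => (x, y))
      path ++ (if PySem.Int.mod x 2 == 0 then col else col.reverse)) []
    = pathFM w h := by
  have hbody : ∀ (p : List (Int × Int)) (x : Int),
      (let col := (PySem.List.pyRange 0 h 1).map (fun y => (x, y));
        p ++ (if PySem.Int.mod x 2 == 0 then col else col.reverse))
      = p ++ snakeSeg h x := by
    intro p x
    unfold snakeSeg snakeCol
    simp only [PySem.List.pyRange_zero, List.map_map]
    rfl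
  rw [PySem.List.pyRange_zero w, List.foldl_map,
    PySem.List.foldl_congr_mem (List.range w.toNat) _
      (fun (p : List (Int × Int)) (j : Nat) => p ++ snakeSeg h (j : Int)) []
      (fun p j _ => hbody p (j : Int)),
    PySem.List.foldl_append_eq_flatMap]
  rfl

lemma order0_eq (w h : Int) :
    (PySem.List.pyRange 0 h 1).map (fun _ => List.replicate w.toNat (0 : Int)) = gridP w h 0 := by
  unfold gridP
  simp only [PySem.List.pyRange_zero, List.map_map]
  apply List.map_congr_left
  intro y hy
  simp [List.map_const']

lemma orderB_eq (w h : Int) :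
    (PySem.List.pyRange 0 h 1).map (fun y =>
      (PySem.List.pyRange 0 w 1).map (fun x =>
        x * h + (if PySem.Int.mod x 2 == 0 then y else h - 1 - y)))
    = gridP w h w.toNat := by
  unfold gridP
  simp only [PySem.List.pyRange_zero, List.map_map]
  apply List.map_congr_left
  intro y hy
  apply List.map_congr_left
  intro x hx
  have := List.mem_range.mp hx
  simp only [Function.comp_apply, if_pos this]
  rfl

-- ===== VERDICT (by name: the statement is the Claim_ definition above) =====
theorem build_snake_path_spec : Claim_equal_build_snake_path := by
  intro w h _
  show build_snake_path w h = build_snake_path_alt w h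
  simp only [build_snake_path, build_snake_path_alt]
  rw [pathA_eq, pathB_eq, order0_eq, orderB_eq]
  exact congrArg (fun g => (g, pathFM w h)) (scatter_prefix w h w.toNat)
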